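-- pv_equiv track=rewrite | github.com/Apostolos00tapsas/PyArchive | Algorithms/Sequences/Stern_Farey.py | Stern_Sequence
-- ===== SOURCE A (Python) =====
-- def Stern_Sequence(n):
--     BrocotSequence = [1,1]
--     # loop to create sequence
--     for i in range(1,  n):
--
--         considered_element = BrocotSequence[i]
--         precedent = BrocotSequence[i-1]
--
--         # adding sum of considered
--         # element and it's precedent
--         BrocotSequence.append(considered_element + precedent)
--
--         # adding next considered element
--         BrocotSequence.append(considered_element)
--
--     return BrocotSequence
-- ===== SOURCE B (Python) =====
-- def Stern_Sequence(n):
--     # Each element is computed independently from the binary expansion of its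
--     # (1-based) position via the iterative fusc algorithm -- no table of
--     # previously produced elements is consulted.
--     def fusc(m):
--         a, b = 1, 0
--         while m > 0:
--             if m % 2 == 1:
--                 b = b + a
--             else:
--                 a = a + b
--             m = m // 2
--         return b
--     L = 2 * n if n > 1 else 2
--     return [fusc(j + 1) for j in range(L)]
-- ===== Notes on version B (the rewrite author's own statement) =====
-- stated objective: alternative
-- what changed: B computes each of the max(2n,2) elements independently as fusc(position+1) via the binary-expansion (iterative fusc) algorithm, instead of A's single pass that extends a growing table using previously stored elements.
import Mathlib
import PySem

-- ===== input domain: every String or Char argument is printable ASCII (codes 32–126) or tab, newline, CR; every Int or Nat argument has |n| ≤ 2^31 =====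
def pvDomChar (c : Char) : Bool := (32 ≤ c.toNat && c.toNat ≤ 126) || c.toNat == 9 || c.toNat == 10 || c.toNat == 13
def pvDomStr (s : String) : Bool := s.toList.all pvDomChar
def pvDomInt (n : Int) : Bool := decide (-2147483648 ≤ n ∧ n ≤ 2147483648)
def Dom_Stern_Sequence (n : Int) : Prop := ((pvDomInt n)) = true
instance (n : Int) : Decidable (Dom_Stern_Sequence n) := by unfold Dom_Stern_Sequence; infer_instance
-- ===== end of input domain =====

-- B computes each of the max(2n,2) elements independently via the binary-expansion (fusc)
-- algorithm instead of A's growing-table pass; objective: alternative (not faster).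

-- ===== PORT A =====
-- indices i and i-1 are always in range (length ≥ 2i at step i), so pyGetD is exact here
def sternStepA (b : List Int) (i : Int) : List Int :=
  let consideredElement := PySem.List.pyGetD b i 0
  let precedent := PySem.List.pyGetD b (i - 1) 0
  (b ++ [consideredElement + precedent]) ++ [consideredElement]

def Stern_Sequence (n : Int) : List Int :=
  (PySem.List.pyRange 1 n 1).foldl sternStepA [1, 1]

-- ===== PORT B =====
-- the while loop of B's fusc, on m.toNat (m = j+1 ≥ 1 is never negative here)
def fuscGo (m : Nat) (a b : Int) : Int :=
  if m = 0 then b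
  else fuscGo (m / 2) (if m % 2 = 1 then a else a + b) (if m % 2 = 1 then b + a else b)
termination_by m
decreasing_by exact Nat.div_lt_self (by omega) (by omega)

def fusc (m : Int) : Int := fuscGo m.toNat 1 0

def Stern_Sequence_alt (n : Int) : List Int :=
  let L := if n > 1 then 2 * n else 2
  (PySem.List.pyRange 0 L 1).map (fun j => fusc (j + 1))

-- ===== PRECONDITION & SPEC =====
def Spec_Stern_Sequence (n : Int) (out : List Int) : Prop := out = Stern_Sequence_alt n
instance (n : Int) (out : List Int) : Decidable (Spec_Stern_Sequence n out) := by unfold Spec_Stern_Sequence; infer_instance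

-- ===== CLAIM =====
def Claim_equal_Stern_Sequence : Prop := ∀ (n : Int), Dom_Stern_Sequence n → Spec_Stern_Sequence n (Stern_Sequence n)

-- ===== LEMMAS AND PROOFS =====

theorem fuscGo_zero (a b : Int) : fuscGo 0 a b = b := by simp [fuscGo]

theorem fuscGo_even (m : Nat) (hm : m ≠ 0) (a b : Int) :
    fuscGo (2 * m) a b = fuscGo m (a + b) b := by
  rw [fuscGo]
  have h0 : 2 * m ≠ 0 := by omega
  have h1 : (2 * m) % 2 = 0 := by omega
  have h2 : (2 * m) / 2 = m := by omega
  simp [h0, h1, h2]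

theorem fuscGo_odd (m : Nat) (a b : Int) :
    fuscGo (2 * m + 1) a b = fuscGo m a (b + a) := by
  rw [fuscGo]
  have h1 : (2 * m + 1) % 2 = 1 := by omega
  have h2 : (2 * m + 1) / 2 = m := by omega
  simp [h1, h2]

theorem fuscGo_add (m : Nat) : ∀ a b a' b' : Int,
    fuscGo m a b + fuscGo m a' b' = fuscGo m (a + a') (b + b') := by
  induction m using Nat.strong_induction_on with
  | _ m ih =>
    intro a b a' b'
    by_cases h : m = 0
    · subst h; simp [fuscGo_zero]
    · rcases Nat.even_or_odd m with ⟨k, hk⟩ | ⟨k, hk⟩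
      · have hk' : m = 2 * k := by omega
        have hknz : k ≠ 0 := by omega
        subst hk'
        rw [fuscGo_even k hknz, fuscGo_even k hknz, fuscGo_even k hknz,
            ih k (by omega)]
        congr 1; ring
      · subst hk
        rw [fuscGo_odd, fuscGo_odd, fuscGo_odd, ih k (by omega)]
        congr 1; ring

theorem fuscGo_shift (m : Nat) : fuscGo m 0 1 = fuscGo (m + 1) 1 0 := by
  induction m using Nat.strong_induction_on with
  | _ m ih =>
    by_cases h : m = 0
    · subst h
      rw [show (0:Nat) + 1 = 2 * 0 + 1 by rfl, fuscGo_odd, fuscGo_zero, fuscGo_zero]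
      norm_num
    · rcases Nat.even_or_odd m with ⟨k, hk⟩ | ⟨k, hk⟩
      · have hk' : m = 2 * k := by omega
        have hknz : k ≠ 0 := by omega
        subst hk'
        have : 2 * k + 1 = 2 * k + 1 := rfl
        rw [fuscGo_even k hknz, fuscGo_odd k 1 0]
        norm_num
      · subst hk
        have h2 : 2 * k + 1 + 1 = 2 * (k + 1) := by omega
        rw [fuscGo_odd, h2, fuscGo_even (k + 1) (by omega)]
        simpa using ih k (by omega)

theorem fusc_even (m : Nat) : fuscGo (2 * m + 2) 1 0 = fuscGo (m + 1) 1 0 := by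
  have h : 2 * m + 2 = 2 * (m + 1) := by omega
  rw [h, fuscGo_even (m + 1) (by omega)]
  norm_num

theorem fusc_odd (m : Nat) : fuscGo (2 * m + 1) 1 0 = fuscGo m 1 0 + fuscGo (m + 1) 1 0 := by
  rw [fuscGo_odd, ← fuscGo_shift m, fuscGo_add m 1 0 0 1]
  norm_num

theorem fuscGo_one (a b : Int) : fuscGo 1 a b = b + a := by
  rw [show (1 : Nat) = 2 * 0 + 1 from rfl, fuscGo_odd, fuscGo_zero]

theorem fuscGo_two : fuscGo 2 1 0 = 1 := by
  rw [show (2 : Nat) = 2 * 1 from rfl, fuscGo_even 1 one_ne_zero, fuscGo_one]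
  norm_num

theorem stern_invariant (k : Nat) :
    (PySem.List.pyRange 1 (1 + (k : Int)) 1).foldl sternStepA [1, 1]
      = (List.range (2 + 2 * k)).map (fun j => fuscGo (j + 1) 1 0) := by
  induction k with
  | zero =>
    norm_num [PySem.List.pyRange_one_eq_nil, List.range_succ, fuscGo_one, fuscGo_two]
  | succ k ih =>
    have h1 : (1 : Int) + ((k + 1 : Nat) : Int) = (1 + (k : Int)) + 1 := by push_cast; ring
    rw [h1, PySem.List.pyRange_one_succ_right (by omega), List.foldl_append,
        List.foldl_cons, List.foldl_nil, ih]
    set s := (List.range (2 + 2 * k)).map (fun j => fuscGo (j + 1) 1 0) with hs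
    have hget : ∀ (m : Nat), m < 2 + 2 * k →
        PySem.List.pyGetD s (m : Int) 0 = fuscGo (m + 1) 1 0 := by
      intro m hm
      rw [PySem.List.pyGetD_natCast]
      simp [hs, List.getD_eq_getElem?_getD, hm]
    have hc1 : (1 : Int) + (k : Int) = ((k + 1 : Nat) : Int) := by push_cast; ring
    have hc2 : (1 : Int) + (k : Int) - 1 = ((k : Nat) : Int) := by omega
    unfold sternStepA
    rw [hc1]
    simp only [hc2] at *
    rw [show ((k + 1 : Nat) : Int) - 1 = ((k : Nat) : Int) by push_cast; ring]
    rw [hget (k + 1) (by omega), hget k (by omega)]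
    have hr : List.range (2 + 2 * (k + 1)) = List.range (2 + 2 * k) ++ [2 + 2 * k] ++ [3 + 2 * k] := by
      rw [show 2 + 2 * (k + 1) = (3 + 2 * k) + 1 by omega, List.range_succ,
          show 3 + 2 * k = (2 + 2 * k) + 1 by omega, List.range_succ]
    rw [hr]
    simp only [List.map_append, List.map_cons, List.map_nil, ← hs, List.append_assoc]
    congr 2
    · rw [show 2 + 2 * k + 1 = 2 * (k + 1) + 1 by omega, fusc_odd]
      ring_nf
    · rw [show 3 + 2 * k + 1 = 2 * (k + 1) + 2 by omega, fusc_even]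

theorem alt_eq_map (k : Nat) :
    (PySem.List.pyRange 0 ((2 + 2 * k : Nat) : Int) 1).map (fun j => fusc (j + 1))
      = (List.range (2 + 2 * k)).map (fun j => fuscGo (j + 1) 1 0) := by
  rw [PySem.List.pyRange_one]
  norm_num [List.map_map]
  apply List.map_congr_left
  intro j hj
  simp only [Function.comp, fusc]
  congr 1

-- ===== VERDICT =====
theorem Stern_Sequence_spec : Claim_equal_Stern_Sequence := by
  intro n _
  unfold Spec_Stern_Sequence Stern_Sequence Stern_Sequence_alt
  simp only []
  by_cases hn : n ≤ 1
  · rw [PySem.List.pyRange_one_eq_nil hn, if_neg (by omega)]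
    have h2 : ((2 + 2 * 0 : Nat) : Int) = 2 := by norm_num
    rw [show (2 : Int) = ((2 + 2 * 0 : Nat) : Int) by norm_num, alt_eq_map 0]
    have := stern_invariant 0
    rw [PySem.List.pyRange_one_eq_nil (by norm_num)] at this
    exact this
  · have hk : n = 1 + ((n - 1).toNat : Int) := by omega
    have hL : (if n > 1 then 2 * n else 2) = ((2 + 2 * (n - 1).toNat : Nat) : Int) := by
      rw [if_pos (by omega)]; push_cast; omega
    rw [hL, alt_eq_map]
    have h := stern_invariant (n - 1).toNat
    rw [← hk] at h
    exact h
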